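-- pv_equiv track=rewrite | github.com/somewherelostt/awesome-base-india | scripts/devfolio-scraper/fetch_devfolio_profiles.py | extract_handle_from_twitter_url
-- ===== SOURCE A (Python) =====
-- def extract_handle_from_twitter_url(url: str) -> str | None:
--     if not url:
--         return None
--     url = url.rstrip("/")
--     # x.com/handle or twitter.com/handle
--     for prefix in ("https://x.com/", "https://twitter.com/", "http://x.com/", "http://twitter.com/"):
--         if url.lower().startswith(prefix):
--             handle = url[len(prefix) :].split("/")[0].split("?")[0].strip()
--             if handle:
--                 return handle
--     return None
-- ===== SOURCE B (Python) =====
-- def extract_handle_from_twitter_url(url):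
--     trimmed = url.rstrip("/")
--     i = trimmed.find("://")
--     if i == -1 or trimmed[:i].lower() not in ("http", "https"):
--         return None
--     rest = trimmed[i + 3:]
--     j = rest.find("/")
--     if j == -1 or rest[:j].lower() not in ("x.com", "twitter.com"):
--         return None
--     handle = rest[j + 1:].split("/")[0].split("?")[0].strip()
--     return handle if handle else None
-- ===== Notes on version B (the rewrite author's own statement) =====
-- stated objective: alternative
-- what changed: Replaces A's loop over four complete lowercase URL prefixes by parsing the URL once into scheme/host/path with str.find and slicing, checking scheme and host against small sets.
import Mathlib
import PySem

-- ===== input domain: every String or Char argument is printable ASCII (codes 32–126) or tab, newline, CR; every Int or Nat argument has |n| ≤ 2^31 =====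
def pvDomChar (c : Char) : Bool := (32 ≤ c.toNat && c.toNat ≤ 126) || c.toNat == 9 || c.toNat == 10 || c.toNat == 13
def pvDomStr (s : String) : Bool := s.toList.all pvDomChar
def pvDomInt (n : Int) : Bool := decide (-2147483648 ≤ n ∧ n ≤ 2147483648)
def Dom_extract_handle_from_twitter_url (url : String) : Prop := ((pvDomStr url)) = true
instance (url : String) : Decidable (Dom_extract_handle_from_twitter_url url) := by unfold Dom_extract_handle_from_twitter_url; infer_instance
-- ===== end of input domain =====

-- B replaces A's loop over four full URL prefixes by parsing the URL once into
-- scheme/host/path with str.find and slices (alternative decomposition, same cost).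

-- ===== PORT A =====
-- shared helper: exact port of Python str.rstrip("/") (drop trailing '/' characters)
def pvRstripSlash (u : List Char) : List Char := List.rdropWhile (fun c => c == '/') u

-- shared helper: x.split("/")[0].split("?")[0].strip()  (split(sep) is never empty, so [0] is headD)
def pvHandle (x : List Char) : List Char :=
  PySem.Chars.strip ((PySem.Chars.splitOn ((PySem.Chars.splitOn x "/".toList).headD []) "?".toList).headD [])

-- A's `for prefix in (...)` loop with its early returns
def pvLoopA (u : List Char) : List (List Char) → Option (List Char)
  | [] => none
  | p :: ps =>
    if PySem.Chars.startswith (PySem.Chars.lower u) p then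
      let handle := pvHandle (u.drop p.length)
      if handle ≠ [] then some handle else pvLoopA u ps
    else pvLoopA u ps

def pvA_chars (u : List Char) : Option (List Char) :=
  if u = [] then none
  else
    pvLoopA (pvRstripSlash u)
      ["https://x.com/".toList, "https://twitter.com/".toList,
       "http://x.com/".toList, "http://twitter.com/".toList]

def extract_handle_from_twitter_url (url : String) : Option String :=
  (pvA_chars url.toList).map String.ofList

-- ===== PORT B =====
-- scheme = trimmed[:i], rest = trimmed[i+3:], host = rest[:j], handle from rest[j+1:]
def pvB_core (t : List Char) : Option (List Char) :=
  let i := PySem.Chars.find t "://".toList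
  if i = -1 ∨ ¬ (PySem.Chars.lower (PySem.Chars.slice t none (some i)) = "http".toList ∨
                 PySem.Chars.lower (PySem.Chars.slice t none (some i)) = "https".toList) then none
  else
    let rest := PySem.Chars.slice t (some (i + 3)) none
    let j := PySem.Chars.find rest "/".toList
    if j = -1 ∨ ¬ (PySem.Chars.lower (PySem.Chars.slice rest none (some j)) = "x.com".toList ∨
                   PySem.Chars.lower (PySem.Chars.slice rest none (some j)) = "twitter.com".toList) then none
    else
      let handle := pvHandle (PySem.Chars.slice rest (some (j + 1)) none)
      if handle = [] then none else some handle

def pvB_chars (u : List Char) : Option (List Char) := pvB_core (pvRstripSlash u)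

def extract_handle_from_twitter_url_alt (url : String) : Option String :=
  (pvB_chars url.toList).map String.ofList

-- ===== PRECONDITION & SPEC =====
def Spec_extract_handle_from_twitter_url (url : String) (out : Option String) : Prop := out = extract_handle_from_twitter_url_alt url
instance (url : String) (out : Option String) : Decidable (Spec_extract_handle_from_twitter_url url out) := by unfold Spec_extract_handle_from_twitter_url; infer_instance

-- ===== CLAIM (what is proved, stated in full; the proofs are below) =====
def Claim_equal_extract_handle_from_twitter_url : Prop := ∀ (url : String), Dom_extract_handle_from_twitter_url url → Spec_extract_handle_from_twitter_url url (extract_handle_from_twitter_url url)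

-- ===== LEMMAS AND PROOFS =====

theorem pv_lowerChar_inv (c d : Char) (hd : d.toNat < 97) : PySem.Chars.lowerChar c = d → c = d := by
  unfold PySem.Chars.lowerChar PySem.Chars.isupper
  split_ifs with h
  · intro he
    exfalso
    simp only [Bool.and_eq_true, decide_eq_true_eq] at h
    have h1 : 65 ≤ c.toNat := Nat.succ_le_of_lt h.1
    have h2 : c.toNat ≤ 90 := Nat.lt_succ_iff.mp (Nat.lt_succ_of_le h.2)
    have hv : (c.toNat + 32).isValidChar := Or.inl (by omega)
    have ht : (Char.ofNat (c.toNat + 32)).toNat = c.toNat + 32 := by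
      rw [Char.toNat_ofNat, if_pos hv]
    rw [he] at ht
    omega
  · exact id

theorem pv_map_lower_eq (sub : List Char)
    (hinv : ∀ c d, d ∈ sub → PySem.Chars.lowerChar c = d → c = d) :
    ∀ L : List Char, L.map PySem.Chars.lowerChar = sub → L = sub := by
  induction sub with
  | nil => intro L h; simpa using h
  | cons d sub' ih =>
    intro L h
    cases L with
    | nil => simp at h
    | cons c L' =>
      simp only [List.map_cons, List.cons.injEq] at h
      have hc : c = d := hinv c d (by simp) h.1
      have : L' = sub' := ih (fun c d hm => hinv c d (by simp [hm])) L' h.2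
      simp [hc, this]

theorem pv_find_eq_of_decomp (t pre sub : List Char) (d0 : Char)
    (hpre : (pre ++ sub) <+: PySem.Chars.lower t)
    (h0 : sub.head? = some d0) (hfix : PySem.Chars.lowerChar d0 = d0) (hd0 : d0 ∉ pre)
    (hinv : ∀ c d, d ∈ sub → PySem.Chars.lowerChar c = d → c = d) :
    PySem.Chars.find t sub = pre.length := by
  have hsubne : 0 < sub.length := by
    cases sub with
    | nil => simp at h0
    | cons a l => simp
  have hlt : PySem.Chars.lower t = t.map PySem.Chars.lowerChar := rfl
  obtain ⟨z, hz⟩ := hpre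
  have hlen : pre.length + sub.length ≤ t.length := by
    have := congrArg List.length hz
    simp [hlt] at this
    omega
  have hocc0 : sub <+: t.drop pre.length := by
    have hmap : (t.drop pre.length).map PySem.Chars.lowerChar = sub ++ z := by
      rw [List.map_drop, ← hlt, ← hz, List.append_assoc, List.drop_left]
    have htake : ((t.drop pre.length).take sub.length).map PySem.Chars.lowerChar = sub := by
      rw [List.map_take, hmap, List.take_left]
    have := pv_map_lower_eq sub hinv _ htake
    exact this ▸ List.take_prefix _ _
  have hd0' : sub[0] = d0 := by
    cases sub with
    | nil => simp at h0
    | cons a l => simpa using h0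
  have hnonneg : 0 ≤ PySem.Chars.find t sub := by
    rw [PySem.Chars.find_nonneg_iff]
    rw [← PySem.Chars.isIn_iff_infix, ← PySem.Chars.exists_prefix_drop_iff_isIn]
    exact ⟨pre.length, hocc0⟩
  obtain ⟨hocc, hmin⟩ := PySem.Chars.find_spec hnonneg
  have hle : (PySem.Chars.find t sub).toNat ≤ pre.length := by
    by_contra hlt'
    exact hmin pre.length (by omega) hocc0
  have hge : pre.length ≤ (PySem.Chars.find t sub).toNat := by
    by_contra hlt'
    rw [not_le] at hlt'
    set f := (PySem.Chars.find t sub).toNat with hf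
    have hflen : f < t.length := by omega
    have h1 : t[f]? = some d0 := by
      have h1' : (List.drop f t)[0]'(by simp; omega) = d0 := by
        have := hocc.getElem (i := 0) hsubne
        rw [hd0'] at this
        exact this.symm
      rw [List.getElem_drop] at h1'
      have h1'' : t[f]'(by omega) = d0 := by simpa using h1'
      rw [List.getElem?_eq_getElem (by omega)]
      exact congrArg some h1''
    have h2 : (PySem.Chars.lower t)[f]? = some d0 := by
      simp only [hlt, List.getElem?_map, h1, Option.map_some, hfix]
    have h3 : (PySem.Chars.lower t)[f]? = some (pre[f]'hlt') := by
      rw [← hz, List.getElem?_append_left (by simp; omega),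
          List.getElem?_append_left hlt', List.getElem?_eq_getElem hlt']
    rw [h2] at h3
    exact hd0 ((Option.some.injEq _ _).mp h3 ▸ List.getElem_mem _)
  omega

theorem pv_inv_colonslash : ∀ c d : Char, d ∈ "://".toList → PySem.Chars.lowerChar c = d → c = d := by
  intro c d hd
  have : d = ':' ∨ d = '/' := by
    simp only [show "://".toList = [':', '/', '/'] from rfl, List.mem_cons, List.not_mem_nil, or_false] at hd
    tauto
  rcases this with h | h <;> subst h <;> exact pv_lowerChar_inv c _ (by decide)

theorem pv_inv_slash : ∀ c d : Char, d ∈ "/".toList → PySem.Chars.lowerChar c = d → c = d := by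
  intro c d hd
  have : d = '/' := by simpa [show "/".toList = ['/'] from rfl] using hd
  subst this
  exact pv_lowerChar_inv c _ (by decide)

theorem pv_matched (t scheme host : List Char)
    (hs : scheme = "http".toList ∨ scheme = "https".toList)
    (hh : host = "x.com".toList ∨ host = "twitter.com".toList)
    (hp : (scheme ++ ("://".toList ++ (host ++ "/".toList))) <+: PySem.Chars.lower t) :
    pvB_core t =
      (if pvHandle (t.drop (scheme.length + 3 + (host.length + 1))) = [] then none
       else some (pvHandle (t.drop (scheme.length + 3 + (host.length + 1))))) := by
  have hcolon : ':' ∉ scheme := by rcases hs with h | h <;> subst h <;> decide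
  have hslash : '/' ∉ host := by rcases hh with h | h <;> subst h <;> decide
  have hstep : (scheme ++ "://".toList) <+: (scheme ++ ("://".toList ++ (host ++ "/".toList))) :=
    ⟨host ++ "/".toList, by simp [List.append_assoc]⟩
  have hpre1 : (scheme ++ "://".toList) <+: PySem.Chars.lower t := List.IsPrefix.trans hstep hp
  have hi : PySem.Chars.find t "://".toList = scheme.length :=
    pv_find_eq_of_decomp t scheme "://".toList ':' hpre1 rfl (by decide) hcolon pv_inv_colonslash
  obtain ⟨z, hz⟩ := hp
  have hlower : PySem.Chars.lower t = scheme ++ "://".toList ++ (host ++ "/".toList ++ z) := by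
    rw [← hz]; simp [List.append_assoc]
  have hslice1 : PySem.Chars.lower (PySem.Chars.slice t none (some (scheme.length : Int))) = scheme := by
    rw [PySem.Chars.slice_eq_listSlice, PySem.List.slice_to_natCast]
    show (t.take scheme.length).map PySem.Chars.lowerChar = scheme
    rw [List.map_take]
    show List.take scheme.length (PySem.Chars.lower t) = scheme
    rw [hlower, List.append_assoc, List.take_left' rfl]
  have hrest : PySem.Chars.slice t (some ((scheme.length : Int) + 3)) none = t.drop (scheme.length + 3) := by
    rw [PySem.Chars.slice_eq_listSlice]
    rw [show ((scheme.length : Int) + 3) = ((scheme.length + 3 : Nat) : Int) by push_cast; ring]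
    rw [PySem.List.slice_from_natCast]
  have hlowrest : PySem.Chars.lower (t.drop (scheme.length + 3)) = host ++ "/".toList ++ z := by
    show (t.drop (scheme.length + 3)).map PySem.Chars.lowerChar = _
    rw [List.map_drop]
    show List.drop (scheme.length + 3) (PySem.Chars.lower t) = _
    rw [hlower, List.drop_left' (by simp)]
  have hprest : (host ++ "/".toList) <+: PySem.Chars.lower (t.drop (scheme.length + 3)) := by
    rw [hlowrest]; exact ⟨z, by simp [List.append_assoc]⟩
  have hj : PySem.Chars.find (t.drop (scheme.length + 3)) "/".toList = host.length :=
    pv_find_eq_of_decomp _ host "/".toList '/' hprest rfl (by decide) hslash pv_inv_slash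
  have hslice2 : PySem.Chars.lower (PySem.Chars.slice (t.drop (scheme.length + 3)) none (some (host.length : Int))) = host := by
    rw [PySem.Chars.slice_eq_listSlice, PySem.List.slice_to_natCast]
    show ((t.drop (scheme.length + 3)).take host.length).map PySem.Chars.lowerChar = host
    rw [List.map_take]
    show List.take host.length (PySem.Chars.lower (t.drop (scheme.length + 3))) = host
    rw [hlowrest, List.append_assoc, List.take_left' rfl]
  have hslice3 : PySem.Chars.slice (t.drop (scheme.length + 3)) (some ((host.length : Int) + 1)) none = t.drop (scheme.length + 3 + (host.length + 1)) := by
    rw [PySem.Chars.slice_eq_listSlice]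
    rw [show ((host.length : Int) + 1) = ((host.length + 1 : Nat) : Int) by push_cast; ring]
    rw [PySem.List.slice_from_natCast, List.drop_drop]
  unfold pvB_core
  simp only [hi]
  simp only [hslice1, hrest]
  simp only [hj]
  simp only [hslice2, hslice3]
  have hne1 : ¬ ((scheme.length : Int) = -1 ∨ ¬ (scheme = "http".toList ∨ scheme = "https".toList)) := by
    rw [not_or, not_not]; exact ⟨by omega, hs⟩
  have hne2 : ¬ ((host.length : Int) = -1 ∨ ¬ (host = "x.com".toList ∨ host = "twitter.com".toList)) := by
    rw [not_or, not_not]; exact ⟨by omega, hh⟩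
  rw [if_neg hne1, if_neg hne2]

theorem pv_lower_append (a b : List Char) :
    PySem.Chars.lower (a ++ b) = PySem.Chars.lower a ++ PySem.Chars.lower b := by
  simp [PySem.Chars.lower]

theorem pv_nomatch (t : List Char)
    (h1 : ¬ ("https://x.com/".toList <+: PySem.Chars.lower t))
    (h2 : ¬ ("https://twitter.com/".toList <+: PySem.Chars.lower t))
    (h3 : ¬ ("http://x.com/".toList <+: PySem.Chars.lower t))
    (h4 : ¬ ("http://twitter.com/".toList <+: PySem.Chars.lower t)) :
    pvB_core t = none := by
  unfold pvB_core
  by_cases hc1 : PySem.Chars.find t "://".toList = -1 ∨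
      ¬ (PySem.Chars.lower (PySem.Chars.slice t none (some (PySem.Chars.find t "://".toList))) = "http".toList ∨
         PySem.Chars.lower (PySem.Chars.slice t none (some (PySem.Chars.find t "://".toList))) = "https".toList)
  · simp only [if_pos hc1]
  rw [if_neg hc1]
  rw [not_or, not_not] at hc1
  obtain ⟨hi_ne, hscheme⟩ := hc1
  have hi_nonneg : 0 ≤ PySem.Chars.find t "://".toList := by
    have := PySem.Chars.neg_one_le_find t "://".toList
    omega
  set iN := (PySem.Chars.find t "://".toList).toNat with hiN
  have hi_cast : PySem.Chars.find t "://".toList = (iN : Int) := by omega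
  obtain ⟨hoccA, _⟩ := PySem.Chars.find_spec hi_nonneg
  obtain ⟨w, hw⟩ := hoccA
  -- rest = w
  have hrest : PySem.Chars.slice t (some (PySem.Chars.find t "://".toList + 3)) none = w := by
    rw [hi_cast, PySem.Chars.slice_eq_listSlice]
    rw [show ((iN : Int) + 3) = ((iN + 3 : Nat) : Int) by push_cast; ring]
    rw [PySem.List.slice_from_natCast, ← List.drop_drop, ← hw, List.drop_left' (by decide)]
  have hscheme' : PySem.Chars.lower (t.take iN) = "http".toList ∨ PySem.Chars.lower (t.take iN) = "https".toList := by
    rw [hi_cast, PySem.Chars.slice_eq_listSlice, PySem.List.slice_to_natCast] at hscheme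
    exact hscheme
  have hlow_t : PySem.Chars.lower t = PySem.Chars.lower (t.take iN) ++ ("://".toList ++ PySem.Chars.lower w) := by
    conv_lhs => rw [← List.take_append_drop iN t]
    rw [pv_lower_append, ← hw, pv_lower_append]
    congr 2
  rw [hrest]
  by_cases hc2 : PySem.Chars.find w "/".toList = -1 ∨
      ¬ (PySem.Chars.lower (PySem.Chars.slice w none (some (PySem.Chars.find w "/".toList))) = "x.com".toList ∨
         PySem.Chars.lower (PySem.Chars.slice w none (some (PySem.Chars.find w "/".toList))) = "twitter.com".toList)
  · simp only [if_pos hc2]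
  exfalso
  rw [not_or, not_not] at hc2
  obtain ⟨hj_ne, hhost⟩ := hc2
  have hj_nonneg : 0 ≤ PySem.Chars.find w "/".toList := by
    have := PySem.Chars.neg_one_le_find w "/".toList
    omega
  set jN := (PySem.Chars.find w "/".toList).toNat with hjN
  have hj_cast : PySem.Chars.find w "/".toList = (jN : Int) := by omega
  obtain ⟨hoccB, _⟩ := PySem.Chars.find_spec hj_nonneg
  obtain ⟨v, hv⟩ := hoccB
  have hhost' : PySem.Chars.lower (w.take jN) = "x.com".toList ∨ PySem.Chars.lower (w.take jN) = "twitter.com".toList := by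
    rw [hj_cast, PySem.Chars.slice_eq_listSlice, PySem.List.slice_to_natCast] at hhost
    exact hhost
  have hlow_w : PySem.Chars.lower w = PySem.Chars.lower (w.take jN) ++ ("/".toList ++ PySem.Chars.lower v) := by
    conv_lhs => rw [← List.take_append_drop jN w]
    rw [pv_lower_append, ← hv, pv_lower_append]
    congr 2
  have hfull : PySem.Chars.lower t =
      PySem.Chars.lower (t.take iN) ++ ("://".toList ++ (PySem.Chars.lower (w.take jN) ++ ("/".toList ++ PySem.Chars.lower v))) := by
    rw [hlow_t, hlow_w]
  rcases hscheme' with hs | hs <;> rcases hhost' with hhm | hhm <;>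
    rw [hs, hhm] at hfull
  · exact h3 ⟨PySem.Chars.lower v, by rw [hfull]; rfl⟩
  · exact h4 ⟨PySem.Chars.lower v, by rw [hfull]; rfl⟩
  · exact h1 ⟨PySem.Chars.lower v, by rw [hfull]; rfl⟩
  · exact h2 ⟨PySem.Chars.lower v, by rw [hfull]; rfl⟩

theorem pv_conflict {l a b : List Char} (i : Nat) (hia : i < a.length) (hib : i < b.length)
    (hne : a[i]'hia ≠ b[i]'hib) (ha : a <+: l) (hb : b <+: l) : False :=
  hne (by rw [ha.getElem hia, hb.getElem hib])

theorem pv_core (t : List Char) :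
    pvLoopA t ["https://x.com/".toList, "https://twitter.com/".toList,
               "http://x.com/".toList, "http://twitter.com/".toList] = pvB_core t := by
  by_cases hm1 : "https://x.com/".toList <+: PySem.Chars.lower t
  · have s1 : PySem.Chars.startswith (PySem.Chars.lower t) "https://x.com/".toList = true :=
      (PySem.Chars.startswith_iff _ _).mpr hm1
    have s2 : PySem.Chars.startswith (PySem.Chars.lower t) "https://twitter.com/".toList = false := by
      rw [Bool.eq_false_iff]; intro hb
      exact pv_conflict 8 (by decide) (by decide) (by decide) hm1 ((PySem.Chars.startswith_iff _ _).mp hb)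
    have s3 : PySem.Chars.startswith (PySem.Chars.lower t) "http://x.com/".toList = false := by
      rw [Bool.eq_false_iff]; intro hb
      exact pv_conflict 4 (by decide) (by decide) (by decide) hm1 ((PySem.Chars.startswith_iff _ _).mp hb)
    have s4 : PySem.Chars.startswith (PySem.Chars.lower t) "http://twitter.com/".toList = false := by
      rw [Bool.eq_false_iff]; intro hb
      exact pv_conflict 4 (by decide) (by decide) (by decide) hm1 ((PySem.Chars.startswith_iff _ _).mp hb)
    rw [pv_matched t "https".toList "x.com".toList (Or.inr rfl) (Or.inl rfl)
        (by rw [show ("https".toList ++ ("://".toList ++ ("x.com".toList ++ "/".toList))) = "https://x.com/".toList from rfl]; exact hm1)]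
    simp only [pvLoopA, s1, s2, s3, s4, if_true, if_false, Bool.false_eq_true]
    rw [show ("https".toList.length + 3 + ("x.com".toList.length + 1)) = "https://x.com/".toList.length from by decide]
    simp only [ne_eq, ite_not]
  by_cases hm2 : "https://twitter.com/".toList <+: PySem.Chars.lower t
  · have s1 : PySem.Chars.startswith (PySem.Chars.lower t) "https://x.com/".toList = false := by
      rw [Bool.eq_false_iff]; intro hb; exact hm1 ((PySem.Chars.startswith_iff _ _).mp hb)
    have s2 : PySem.Chars.startswith (PySem.Chars.lower t) "https://twitter.com/".toList = true :=
      (PySem.Chars.startswith_iff _ _).mpr hm2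
    have s3 : PySem.Chars.startswith (PySem.Chars.lower t) "http://x.com/".toList = false := by
      rw [Bool.eq_false_iff]; intro hb
      exact pv_conflict 4 (by decide) (by decide) (by decide) hm2 ((PySem.Chars.startswith_iff _ _).mp hb)
    have s4 : PySem.Chars.startswith (PySem.Chars.lower t) "http://twitter.com/".toList = false := by
      rw [Bool.eq_false_iff]; intro hb
      exact pv_conflict 4 (by decide) (by decide) (by decide) hm2 ((PySem.Chars.startswith_iff _ _).mp hb)
    rw [pv_matched t "https".toList "twitter.com".toList (Or.inr rfl) (Or.inr rfl)
        (by rw [show ("https".toList ++ ("://".toList ++ ("twitter.com".toList ++ "/".toList))) = "https://twitter.com/".toList from rfl]; exact hm2)]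
    simp only [pvLoopA, s1, s2, s3, s4, if_true, if_false, Bool.false_eq_true]
    rw [show ("https".toList.length + 3 + ("twitter.com".toList.length + 1)) = "https://twitter.com/".toList.length from by decide]
    simp only [ne_eq, ite_not]
  by_cases hm3 : "http://x.com/".toList <+: PySem.Chars.lower t
  · have s1 : PySem.Chars.startswith (PySem.Chars.lower t) "https://x.com/".toList = false := by
      rw [Bool.eq_false_iff]; intro hb; exact hm1 ((PySem.Chars.startswith_iff _ _).mp hb)
    have s2 : PySem.Chars.startswith (PySem.Chars.lower t) "https://twitter.com/".toList = false := by
      rw [Bool.eq_false_iff]; intro hb; exact hm2 ((PySem.Chars.startswith_iff _ _).mp hb)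
    have s3 : PySem.Chars.startswith (PySem.Chars.lower t) "http://x.com/".toList = true :=
      (PySem.Chars.startswith_iff _ _).mpr hm3
    have s4 : PySem.Chars.startswith (PySem.Chars.lower t) "http://twitter.com/".toList = false := by
      rw [Bool.eq_false_iff]; intro hb
      exact pv_conflict 7 (by decide) (by decide) (by decide) hm3 ((PySem.Chars.startswith_iff _ _).mp hb)
    rw [pv_matched t "http".toList "x.com".toList (Or.inl rfl) (Or.inl rfl)
        (by rw [show ("http".toList ++ ("://".toList ++ ("x.com".toList ++ "/".toList))) = "http://x.com/".toList from rfl]; exact hm3)]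
    simp only [pvLoopA, s1, s2, s3, s4, if_true, if_false, Bool.false_eq_true]
    rw [show ("http".toList.length + 3 + ("x.com".toList.length + 1)) = "http://x.com/".toList.length from by decide]
    simp only [ne_eq, ite_not]
  by_cases hm4 : "http://twitter.com/".toList <+: PySem.Chars.lower t
  · have s1 : PySem.Chars.startswith (PySem.Chars.lower t) "https://x.com/".toList = false := by
      rw [Bool.eq_false_iff]; intro hb; exact hm1 ((PySem.Chars.startswith_iff _ _).mp hb)
    have s2 : PySem.Chars.startswith (PySem.Chars.lower t) "https://twitter.com/".toList = false := by
      rw [Bool.eq_false_iff]; intro hb; exact hm2 ((PySem.Chars.startswith_iff _ _).mp hb)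
    have s3 : PySem.Chars.startswith (PySem.Chars.lower t) "http://x.com/".toList = false := by
      rw [Bool.eq_false_iff]; intro hb; exact hm3 ((PySem.Chars.startswith_iff _ _).mp hb)
    have s4 : PySem.Chars.startswith (PySem.Chars.lower t) "http://twitter.com/".toList = true :=
      (PySem.Chars.startswith_iff _ _).mpr hm4
    rw [pv_matched t "http".toList "twitter.com".toList (Or.inl rfl) (Or.inr rfl)
        (by rw [show ("http".toList ++ ("://".toList ++ ("twitter.com".toList ++ "/".toList))) = "http://twitter.com/".toList from rfl]; exact hm4)]
    simp only [pvLoopA, s1, s2, s3, s4, if_true, if_false, Bool.false_eq_true]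
    rw [show ("http".toList.length + 3 + ("twitter.com".toList.length + 1)) = "http://twitter.com/".toList.length from by decide]
    simp only [ne_eq, ite_not]
  · have s1 : PySem.Chars.startswith (PySem.Chars.lower t) "https://x.com/".toList = false := by
      rw [Bool.eq_false_iff]; intro hb; exact hm1 ((PySem.Chars.startswith_iff _ _).mp hb)
    have s2 : PySem.Chars.startswith (PySem.Chars.lower t) "https://twitter.com/".toList = false := by
      rw [Bool.eq_false_iff]; intro hb; exact hm2 ((PySem.Chars.startswith_iff _ _).mp hb)
    have s3 : PySem.Chars.startswith (PySem.Chars.lower t) "http://x.com/".toList = false := by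
      rw [Bool.eq_false_iff]; intro hb; exact hm3 ((PySem.Chars.startswith_iff _ _).mp hb)
    have s4 : PySem.Chars.startswith (PySem.Chars.lower t) "http://twitter.com/".toList = false := by
      rw [Bool.eq_false_iff]; intro hb; exact hm4 ((PySem.Chars.startswith_iff _ _).mp hb)
    rw [pv_nomatch t hm1 hm2 hm3 hm4]
    simp only [pvLoopA, s1, s2, s3, s4, if_false, Bool.false_eq_true]

-- ===== VERDICT (by name: the statement is the Claim_ definition above) =====
theorem extract_handle_from_twitter_url_spec : Claim_equal_extract_handle_from_twitter_url := by
  intro url _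
  unfold Spec_extract_handle_from_twitter_url extract_handle_from_twitter_url extract_handle_from_twitter_url_alt
  congr 1
  unfold pvA_chars pvB_chars
  by_cases h : url.toList = []
  · simp [h]; rfl
  · simp only [h, if_false]
    exact pv_core (pvRstripSlash url.toList)
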